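-- pv_equiv track=rewrite | github.com/duilec/CS61A-spring2022 | lab/lab01/parsons_probs/digit_pos_match.py | digit_pos_match
-- ===== SOURCE A (Python) =====
-- def digit_pos_match(n, k):
--     """
--     >>> digit_pos_match(980, 0) # .Case 1
--     True
--     >>> digit_pos_match(980, 2) # .Case 2
--     False
--     >>> digit_pos_match(98276, 2) # .Case 3
--     True
--     >>> digit_pos_match(98276, 3) # .Case 4
--     False
--     """
--     "*** YOUR CODE HERE ***"
--     if k == 0:
--         if n % 10 == 0:
--             return True
--         else:
--             return False
--     i = k
--     while i:
--         n //= 10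
--         i -= 1
--     if n % 10 == k:
--         return True
--     else:
--         return False
-- ===== SOURCE B (Python) =====
-- def digit_pos_match(n, k):
--     return n // 10**k % 10 == k
-- ===== Notes on version B (the rewrite author's own statement) =====
-- stated objective: simpler
-- what changed: Replaces the k-step divide-by-10 loop and the k==0 special case with a single closed-form positional extraction n // 10**k % 10 == k.
import Mathlib
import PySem

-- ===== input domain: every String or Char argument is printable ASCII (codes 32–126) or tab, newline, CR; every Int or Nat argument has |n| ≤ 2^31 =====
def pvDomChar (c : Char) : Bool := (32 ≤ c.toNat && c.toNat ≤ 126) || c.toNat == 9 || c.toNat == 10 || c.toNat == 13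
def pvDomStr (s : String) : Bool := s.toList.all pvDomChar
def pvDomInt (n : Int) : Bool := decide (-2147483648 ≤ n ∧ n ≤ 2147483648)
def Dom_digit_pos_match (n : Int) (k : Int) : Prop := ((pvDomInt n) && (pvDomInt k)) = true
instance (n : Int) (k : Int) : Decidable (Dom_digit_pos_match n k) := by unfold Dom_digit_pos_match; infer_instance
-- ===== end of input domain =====

-- B replaces A's k-step divide-by-10 loop (and its k==0 special case) with the closed form
-- n // 10**k % 10 == k; objective: simpler.


-- ===== PORT A =====
-- the 'while i: n //= 10; i -= 1' loop, run i times (Pre_ gives k ≥ 0, so i = k.toNat)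
def digit_pos_match_loop (n : Int) : Nat → Int
  | 0 => n
  | i + 1 => digit_pos_match_loop (PySem.Int.floordiv n 10) i

def digit_pos_match (n : Int) (k : Int) : Bool :=
  if k == 0 then
    if PySem.Int.mod n 10 == 0 then true else false
  else
    let n' := digit_pos_match_loop n k.toNat
    if PySem.Int.mod n' 10 == k then true else false

-- ===== PORT B =====
def digit_pos_match_alt (n : Int) (k : Int) : Bool :=
  PySem.Int.mod (PySem.Int.floordiv n (10 ^ k.toNat)) 10 == k

-- ===== PRECONDITION & SPEC =====
-- Pre_ excludes k < 0, on which A's while-loop never terminates (i stays truthy forever).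
def Pre_digit_pos_match (n : Int) (k : Int) : Prop := 0 ≤ k
instance (n : Int) (k : Int) : Decidable (Pre_digit_pos_match n k) := by unfold Pre_digit_pos_match; infer_instance
def pvWitness_digit_pos_match : Int × Int := (98276, 2)

def Spec_digit_pos_match (n : Int) (k : Int) (out : Bool) : Prop := out = digit_pos_match_alt n k
instance (n : Int) (k : Int) (out : Bool) : Decidable (Spec_digit_pos_match n k out) := by unfold Spec_digit_pos_match; infer_instance

-- ===== CLAIM (what is proved, stated in full; the proofs are below) =====
def Claim_equal_digit_pos_match : Prop := ∀ (n : Int) (k : Int), Dom_digit_pos_match n k → Pre_digit_pos_match n k → Spec_digit_pos_match n k (digit_pos_match n k)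

-- ===== LEMMAS AND PROOFS =====

-- repeated floor division by 10 is floor division by 10^i
theorem digit_pos_match_loop_eq (n : Int) (i : Nat) :
    digit_pos_match_loop n i = PySem.Int.floordiv n (10 ^ i) := by
  induction i generalizing n with
  | zero => simp [digit_pos_match_loop, PySem.Int.floordiv]
  | succ i ih =>
    rw [digit_pos_match_loop, ih]
    rw [PySem.Int.floordiv_eq_ediv_of_pos (by positivity),
        PySem.Int.floordiv_eq_ediv_of_pos (by norm_num),
        PySem.Int.floordiv_eq_ediv_of_pos (by positivity)]
    rw [Int.ediv_ediv_of_nonneg (by norm_num)]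
    ring_nf

-- ===== VERDICT (by name: the statement is the Claim_ definition above) =====
theorem digit_pos_match_spec : Claim_equal_digit_pos_match := by
  intro n k _ hk
  unfold Spec_digit_pos_match digit_pos_match digit_pos_match_alt
  have hdiv1 : ∀ m : Int, PySem.Int.floordiv m 1 = m := by
    intro m; rw [PySem.Int.floordiv_eq_ediv_of_pos (by norm_num)]; exact Int.ediv_one m
  by_cases h0 : k = 0
  · subst h0
    simp only [beq_self_eq_true, if_true, Int.toNat_zero, pow_zero, hdiv1]
    cases hb : (PySem.Int.mod n 10 == 0) <;> rfl
  · simp only [beq_iff_eq, h0, if_false]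
    rw [digit_pos_match_loop_eq]
    by_cases h : PySem.Int.mod (PySem.Int.floordiv n (10 ^ k.toNat)) 10 = k
    · rw [if_pos h]; exact (beq_iff_eq.mpr h).symm
    · rw [if_neg h]; exact ((beq_eq_false_iff_ne).mpr h).symm
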